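-- pv_equiv track=rewrite | github.com/Eighty-5/PIF-Soul-Manager | test_2.py | recur_num
-- ===== SOURCE A (Python) =====
-- TMP_NUM = '000'
--
-- def recur_num(starter_number, check_number, updater_dict, update_sequence):
--     if updater_dict[check_number] == starter_number:
--         update_sequence.append({check_number:TMP_NUM})
--         updater_dict[TMP_NUM] = starter_number
--         updater_dict[check_number] = TMP_NUM
--         updater_dict.pop(check_number)
--         return updater_dict, update_sequence
--     elif updater_dict[check_number] in updater_dict:
--         updater_dict, update_sequence = recur_num(starter_number, updater_dict[check_number], updater_dict, update_sequence)
--     update_sequence.append({check_number:updater_dict[check_number]})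
--     updater_dict.pop(check_number)
--
--     return updater_dict, update_sequence
-- ===== SOURCE B (Python) =====
-- TMP_NUM = '000'
--
-- def recur_num(starter_number, check_number, updater_dict, update_sequence):
--     # Iterative version: descend the chain collecting nodes, then unwind in reverse.
--     # Mutates updater_dict and update_sequence in place, like the original.
--     chain = []
--     cur = check_number
--     while True:
--         val = updater_dict[cur]
--         if val == starter_number:
--             update_sequence.append({cur: TMP_NUM})
--             updater_dict[TMP_NUM] = starter_number
--             updater_dict[cur] = TMP_NUM
--             updater_dict.pop(cur)
--             break
--         if val in updater_dict:
--             chain.append(cur)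
--             cur = val
--             continue
--         update_sequence.append({cur: val})
--         updater_dict.pop(cur)
--         break
--     for node in reversed(chain):
--         update_sequence.append({node: updater_dict[node]})
--         updater_dict.pop(node)
--     return updater_dict, update_sequence
-- ===== Notes on version B (the rewrite author's own statement) =====
-- stated objective: alternative
-- what changed: Replaces A's recursion with an explicit iterative descent that collects the chain of visited keys, then a second reverse pass that reproduces the post-order unwind (appends and pops).
import Mathlib
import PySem

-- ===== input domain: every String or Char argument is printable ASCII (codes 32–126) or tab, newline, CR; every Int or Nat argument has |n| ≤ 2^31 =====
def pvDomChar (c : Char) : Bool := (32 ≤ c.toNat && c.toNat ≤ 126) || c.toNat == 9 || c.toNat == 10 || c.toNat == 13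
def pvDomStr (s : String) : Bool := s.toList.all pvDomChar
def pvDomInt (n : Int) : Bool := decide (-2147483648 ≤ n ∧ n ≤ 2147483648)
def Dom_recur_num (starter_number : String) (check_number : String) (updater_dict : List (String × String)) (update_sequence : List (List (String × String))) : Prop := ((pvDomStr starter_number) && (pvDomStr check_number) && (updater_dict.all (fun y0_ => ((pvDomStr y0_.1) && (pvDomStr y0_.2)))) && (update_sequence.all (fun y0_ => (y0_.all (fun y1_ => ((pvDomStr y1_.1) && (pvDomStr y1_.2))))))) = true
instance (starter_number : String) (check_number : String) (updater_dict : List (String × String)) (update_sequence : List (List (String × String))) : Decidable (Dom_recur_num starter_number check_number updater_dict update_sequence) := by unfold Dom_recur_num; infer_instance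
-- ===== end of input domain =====

-- B replaces A's recursion by an explicit descent loop collecting the chain plus a reverse unwind pass
-- (objective: alternative decomposition; same cost). Both A and B mutate updater_dict / update_sequence
-- in place in Python, in the same way; the claim is about the returned pair.


-- ===== PORT A =====
-- Fuel-bounded transcription of A's recursion; `none` = the Python call raises
-- (KeyError, or RecursionError when the chain cycles — fuel length+1 bounds any
-- terminating, hence non-revisiting, chain).  Dicts are PySem.Dict built from the
-- association list exactly as Python's dict() builds them.
def recurA (fuel : Nat) (st : String) (ck : String) (d : PySem.Dict String String)
    (us : List (List (String × String))) :
    Option (PySem.Dict String String × List (List (String × String))) :=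
  match fuel with
  | 0 => none
  | fuel + 1 =>
    match d.get? ck with
    | none => none                                  -- updater_dict[check_number] raises KeyError
    | some v =>
      if v = st then
        some (((d.insert "000" st).insert ck "000").erase ck, us ++ [[(ck, "000")]])
      else if d.contains v then
        match recurA fuel st v d us with
        | none => none
        | some (d', us') =>
          match d'.get? ck with
          | none => none                            -- re-read updater_dict[check_number] raises
          | some v' => some (d'.erase ck, us' ++ [[(ck, v')]])
      else
        some (d.erase ck, us ++ [[(ck, v)]])

def recur_num (starter_number : String) (check_number : String) (updater_dict : List (String × String)) (update_sequence : List (List (String × String))) : (List (String × String)) × (List (List (String × String))) :=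
  let d := PySem.Dict.ofList updater_dict
  let us := update_sequence.map (fun e => (PySem.Dict.ofList e).items)
  match recurA (updater_dict.length + 1) starter_number check_number d us with
  | some (d', us') => (d'.items, us')
  | none => (updater_dict, update_sequence)          -- unreachable under Pre_ (Python raises)

-- ===== PORT B =====
-- Descent loop of Source B: walk the chain, doing the terminal action and collecting
-- the visited nodes; fuel plays the role of the (in Python implicit) divergence on cycles.
def loopB (fuel : Nat) (st : String) (cur : String) (d : PySem.Dict String String)
    (us : List (List (String × String))) (chain : List String) :
    Option (PySem.Dict String String × List (List (String × String)) × List String) :=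
  match fuel with
  | 0 => none
  | fuel + 1 =>
    match d.get? cur with
    | none => none                                  -- updater_dict[cur] raises KeyError
    | some v =>
      if v = st then
        some (((d.insert "000" st).insert cur "000").erase cur, us ++ [[(cur, "000")]], chain)
      else if d.contains v then
        loopB fuel st v d us (chain ++ [cur])
      else
        some (d.erase cur, us ++ [[(cur, v)]], chain)

-- the `for node in reversed(chain)` unwind of Source B (lookup may raise, hence Option state)
def unwindB (st0 : PySem.Dict String String × List (List (String × String)))
    (chain : List String) :
    Option (PySem.Dict String String × List (List (String × String))) :=
  chain.reverse.foldl
    (fun acc node => acc.bind (fun du =>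
      (du.1.get? node).map (fun v => (du.1.erase node, du.2 ++ [[(node, v)]]))))
    (some st0)

def recur_num_alt (starter_number : String) (check_number : String) (updater_dict : List (String × String)) (update_sequence : List (List (String × String))) : (List (String × String)) × (List (List (String × String))) :=
  let d := PySem.Dict.ofList updater_dict
  let us := update_sequence.map (fun e => (PySem.Dict.ofList e).items)
  match loopB (updater_dict.length + 1) starter_number check_number d us [] with
  | none => (updater_dict, update_sequence)          -- unreachable under Pre_
  | some (d', us', chain) =>
    match unwindB (d', us') chain with
    | none => (updater_dict, update_sequence)        -- unreachable under Pre_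
    | some (d'', us'') => (d''.items, us'')

-- ===== PRECONDITION & SPEC =====
-- the i-th node of the lookup chain starting at ck (stationary once the key is missing)
def pvNode (d : PySem.Dict String String) (ck : String) : Nat → String
  | 0 => ck
  | n + 1 => d.getD (pvNode d ck n) (pvNode d ck n)
-- node x recurses: its value exists, differs from starter and is again a key
def pvCont (d : PySem.Dict String String) (st : String) (x : String) : Bool :=
  match d.get? x with
  | none => false
  | some v => v ≠ st && d.contains v
-- node x ends the chain normally: its value exists and equals starter or is not a key
def pvTerm (d : PySem.Dict String String) (st : String) (x : String) : Bool :=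
  match d.get? x with
  | none => false
  | some v => v = st || !d.contains v

-- Pre_ = exactly the inputs where Python A returns: the lookup chain from check_number
-- reaches a terminating node (value = starter, or value not a key) with every earlier
-- lookup succeeding; otherwise A raises KeyError or RecursionError.
def Pre_recur_num (starter_number : String) (check_number : String) (updater_dict : List (String × String)) (update_sequence : List (List (String × String))) : Prop :=
  ∃ n < updater_dict.length + 1,
    (∀ i < n, pvCont (PySem.Dict.ofList updater_dict) starter_number (pvNode (PySem.Dict.ofList updater_dict) check_number i) = true) ∧
    pvTerm (PySem.Dict.ofList updater_dict) starter_number (pvNode (PySem.Dict.ofList updater_dict) check_number n) = true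
instance (starter_number : String) (check_number : String) (updater_dict : List (String × String)) (update_sequence : List (List (String × String))) : Decidable (Pre_recur_num starter_number check_number updater_dict update_sequence) := by unfold Pre_recur_num; infer_instance

def pvWitness_recur_num : String × String × (List (String × String)) × (List (List (String × String))) :=
  ("1", "3", [("3", "2"), ("2", "1")], [])

def Spec_recur_num (starter_number : String) (check_number : String) (updater_dict : List (String × String)) (update_sequence : List (List (String × String))) (out : (List (String × String)) × (List (List (String × String)))) : Prop := out = recur_num_alt starter_number check_number updater_dict update_sequence
instance (starter_number : String) (check_number : String) (updater_dict : List (String × String)) (update_sequence : List (List (String × String))) (out : (List (String × String)) × (List (List (String × String)))) : Decidable (Spec_recur_num starter_number check_number updater_dict update_sequence out) := by unfold Spec_recur_num; infer_instance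

-- ===== CLAIM (what is proved, stated in full; the proofs are below) =====
def Claim_equal_recur_num : Prop := ∀ (starter_number : String) (check_number : String) (updater_dict : List (String × String)) (update_sequence : List (List (String × String))), Dom_recur_num starter_number check_number updater_dict update_sequence → Pre_recur_num starter_number check_number updater_dict update_sequence → Spec_recur_num starter_number check_number updater_dict update_sequence (recur_num starter_number check_number updater_dict update_sequence)

-- ===== LEMMAS AND PROOFS =====

-- the chain accumulator only ever grows on the right
lemma loopB_chain_prefix (fuel : Nat) (st : String) :
    ∀ (cur : String) d us chain,
      loopB fuel st cur d us chain
        = (loopB fuel st cur d us []).map (fun r => (r.1, r.2.1, chain ++ r.2.2)) := by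
  induction fuel with
  | zero => intro cur d us chain; rfl
  | succ fuel ih =>
    intro cur d us chain
    simp only [loopB]
    cases h : d.get? cur with
    | none => rfl
    | some v =>
      by_cases hv : v = st
      · simp [hv]
      · by_cases hc : d.contains v
        · simp only [hv, hc, if_pos, List.nil_append]
          rw [ih v d us (chain ++ [cur]), ih v d us [cur]]
          simp [Option.map_map, Function.comp_def, List.append_assoc]
        · simp [hv, hc]

-- peeling the last unwind step off unwindB
lemma unwindB_cons (st0 : PySem.Dict String String × List (List (String × String)))
    (cur : String) (chain : List String) :
    unwindB st0 (cur :: chain)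
      = (unwindB st0 chain).bind (fun du =>
          (du.1.get? cur).map (fun v => (du.1.erase cur, du.2 ++ [[(cur, v)]]))) := by
  simp only [unwindB, List.reverse_cons, List.foldl_append, List.foldl_cons, List.foldl_nil]

-- A's recursive unwinding is B's loop followed by the reverse fold
lemma recurA_eq_loopB (fuel : Nat) (st : String) :
    ∀ (cur : String) d us,
      recurA fuel st cur d us
        = (loopB fuel st cur d us []).bind (fun r => unwindB (r.1, r.2.1) r.2.2) := by
  induction fuel with
  | zero => intro cur d us; rfl
  | succ fuel ih =>
    intro cur d us
    simp only [recurA, loopB]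
    cases h : d.get? cur with
    | none => rfl
    | some v =>
      by_cases hv : v = st
      · simp [hv, unwindB]
      · by_cases hc : d.contains v
        · simp only [hv, hc, if_pos, List.nil_append]
          rw [ih v d us, loopB_chain_prefix fuel st v d us [cur]]
          cases hl : loopB fuel st v d us [] with
          | none => rfl
          | some r =>
            simp only [Option.map_some, Option.bind_some, List.singleton_append,
              if_false, unwindB_cons]
            cases hu : unwindB (r.1, r.2.1) r.2.2 with
            | none => rfl
            | some p =>
              simp only [Option.bind_some]
              cases hg : p.1.get? cur <;> simp
        · simp [hv, hc, unwindB]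

-- ===== VERDICT (by name: the statement is the Claim_ definition above) =====
theorem recur_num_spec : Claim_equal_recur_num := by
  intro st ck ud us _ _
  show _ = _
  simp only [recur_num, recur_num_alt, recurA_eq_loopB]
  cases hl : loopB (ud.length + 1) st ck (PySem.Dict.ofList ud)
      (us.map (fun e => (PySem.Dict.ofList e).items)) [] with
  | none => rfl
  | some r =>
    obtain ⟨d1, us1, ch⟩ := r
    simp only [Option.bind_some]
    cases hu : unwindB (d1, us1) ch with
    | none => rfl
    | some p => rfl
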